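-- pv_equiv track=rewrite | github.com/MalcolmCusack/Python_Projects | Poker_hand_evluation.py | n_of_kind
-- ===== SOURCE A (Python) =====
-- def n_of_kind(ranks, n):
--     of_kind = False
--     for i in range (len(ranks)):
--         flag = ranks[i]
--         count = 0
--         for rank in ranks:
--             if flag == rank:
--                 count += 1
--         if count == n:
--             of_kind = True
--     return of_kind
-- ===== SOURCE B (Python) =====
-- def n_of_kind(ranks, n):
--     counts = {}
--     for r in ranks:
--         counts[r] = counts.get(r, 0) + 1
--     return n in counts.values()
-- ===== Notes on version B (the rewrite author's own statement) =====
-- stated objective: faster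
-- what changed: Replaces the per-index full rescan of the list with a single pass building a dict of counts, then a membership test on the dict's values.
import Mathlib
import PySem

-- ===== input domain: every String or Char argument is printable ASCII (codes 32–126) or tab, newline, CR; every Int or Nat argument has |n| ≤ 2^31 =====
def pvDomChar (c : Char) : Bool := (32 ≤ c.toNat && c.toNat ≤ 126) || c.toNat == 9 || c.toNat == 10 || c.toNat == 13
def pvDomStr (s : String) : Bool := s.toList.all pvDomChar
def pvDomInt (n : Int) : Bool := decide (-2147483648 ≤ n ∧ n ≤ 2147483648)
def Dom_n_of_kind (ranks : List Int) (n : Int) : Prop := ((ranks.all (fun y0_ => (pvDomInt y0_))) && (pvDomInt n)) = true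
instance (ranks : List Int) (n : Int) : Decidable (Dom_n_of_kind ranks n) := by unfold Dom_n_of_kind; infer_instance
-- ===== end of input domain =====

-- B replaces A's per-index full rescan with a one-pass count dictionary plus a values-membership test; measurably faster on large inputs.


-- ===== PORT A =====
-- for i in range(len(ranks)): flag = ranks[i]; count = 0; for rank in ranks: if flag == rank: count += 1; if count == n: of_kind = True
-- ranks[i] with i drawn from range(len(ranks)) is always in range, so pyGetD is exact here.
def n_of_kind (ranks : List Int) (n : Int) : Bool :=
  (PySem.List.pyRange 0 (ranks.length : Int) 1).foldl
    (fun of_kind i =>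
      let flag := PySem.List.pyGetD ranks i 0
      let count := ranks.foldl (fun c rank => if flag == rank then c + 1 else c) (0 : Int)
      if count == n then true else of_kind)
    false

-- ===== PORT B =====
-- counts = {}; for r in ranks: counts[r] = counts.get(r, 0) + 1; return n in counts.values()
def n_of_kind_alt (ranks : List Int) (n : Int) : Bool :=
  let counts := ranks.foldl (fun d r => d.insert r (d.getD r 0 + 1)) (PySem.Dict.empty : PySem.Dict Int Int)
  counts.values.contains n

-- ===== PRECONDITION & SPEC =====
def Spec_n_of_kind (ranks : List Int) (n : Int) (out : Bool) : Prop := out = n_of_kind_alt ranks n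
instance (ranks : List Int) (n : Int) (out : Bool) : Decidable (Spec_n_of_kind ranks n out) := by unfold Spec_n_of_kind; infer_instance

-- ===== CLAIM (what is proved, stated in full; the proofs are below) =====
def Claim_equal_n_of_kind : Prop := ∀ (ranks : List Int) (n : Int), Dom_n_of_kind ranks n → Spec_n_of_kind ranks n (n_of_kind ranks n)

-- ===== LEMMAS AND PROOFS =====

-- A returns true iff some element of ranks occurs exactly n times.
lemma n_of_kind_iff (ranks : List Int) (n : Int) :
    n_of_kind ranks n = true ↔ ∃ v ∈ ranks, (ranks.count v : Int) = n := by
  unfold n_of_kind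
  simp only [PySem.List.foldl_if_true_eq
    (p := fun i => (ranks.foldl (fun c rank => if PySem.List.pyGetD ranks i 0 == rank then c + 1 else c) (0 : Int)) == n)]
  rw [PySem.List.pyRange_zero_natCast]
  simp only [Bool.false_or, List.any_map, List.any_eq_true, List.mem_range, Function.comp_apply,
    PySem.List.pyGetD_natCast, beq_iff_eq, PySem.List.foldl_ite_add_one, zero_add]
  have hc : ∀ (v : Int), ranks.countP (fun rank => decide (v = rank)) = ranks.count v := by
    intro v
    rw [List.count]
    refine List.countP_congr (fun x _ => ?_)
    by_cases h : v = x
    · subst h; simp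
    · simp [h]; exact fun e => h (Eq.symm e)
  constructor
  · rintro ⟨i, hi, h⟩
    refine ⟨ranks.getD i 0, ?_, ?_⟩
    · rw [List.getD_eq_getElem _ _ hi]; exact List.getElem_mem hi
    · rw [← hc]; exact h
  · rintro ⟨v, hv, h⟩
    obtain ⟨i, hi, rfl⟩ := List.mem_iff_getElem.1 hv
    refine ⟨i, hi, ?_⟩
    rw [List.getD_eq_getElem _ _ hi, hc]; exact h

-- B returns true iff some element of ranks occurs exactly n times.
lemma n_of_kind_alt_iff (ranks : List Int) (n : Int) :
    n_of_kind_alt ranks n = true ↔ ∃ v ∈ ranks, (ranks.count v : Int) = n := by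
  unfold n_of_kind_alt
  rw [PySem.Dict.foldl_insert_getD_add_one_eq_counter]
  simp only [PySem.Dict.values, PySem.Dict.items_counter, List.map_map]
  simp [PySem.Set.mem_ofList, eq_comm]

-- ===== VERDICT (by name: the statement is the Claim_ definition above) =====
theorem n_of_kind_spec : Claim_equal_n_of_kind := by
  intro ranks n _
  unfold Spec_n_of_kind
  rw [Bool.eq_iff_iff, n_of_kind_iff, n_of_kind_alt_iff]
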